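-- pv_equiv track=rewrite | github.com/Arsen1302/Code-copy-detector | TestData/solutions/problem_1707_4.py | solution_1707_4
-- ===== SOURCE A (Python) =====
-- from typing import List
--
-- def solution_1707_4(creators: List[str], ids: List[str], views: List[int]) -> List[List[str]]:
--     """
--     summary : each creator will get to be a key in a  dictionary that contains
--     the 1st item the sum of all the views so far
--     the 2nd the id(in case if the value of max seen is the same the smallest one lexicographically)
--     the 3rd item the maxviews so far
--
--     when we have all this data we look for the biggest sum and append the name of the creator and the id
--     to the ans list
--     """
--     data = {}
--     for creator, id , view in zip(creators, ids, views):
--         if creator in data: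
--             data[creator][0] += view
--             if  view>data[creator][2]:
--                 data[creator][2] = view
--                 data[creator][1] = id
--                 continue
--             if  view==data[creator][2] and id< data[creator][1]:
--                 data[creator][1] = id
--                 continue
--         else:
--             data[creator] = [view,id,view]
--     maxView = 0
--     ans = []
--     for k,v in data.items():
--         if v[0]>maxView:
--             ans =[]
--             maxView =v[0]
--         if v[0]==maxView:
--             ans.append([k,v[1]])
--     return ans
-- ===== SOURCE B (Python) =====
-- def solution_1707_4(creators, ids, views):
--     groups = {}
--     for creator, id, view in zip(creators, ids, views):
--         groups.setdefault(creator, []).append((view, id))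
--     maxView = 0
--     ans = []
--     for creator, recs in groups.items():
--         total = sum(v for v, _ in recs)
--         best = min(recs, key=lambda r: (-r[0], r[1]))
--         if total > maxView:
--             ans = []
--             maxView = total
--         if total == maxView:
--             ans.append([creator, best[1]])
--     return ans
-- ===== Notes on version B (the rewrite author's own statement) =====
-- stated objective: simpler
-- what changed: B replaces A's incremental per-creator [sum, bestId, maxView] triple maintenance with a group-then-reduce pass: it first groups (view, id) records per creator with setdefault/append, then derives each creator's total by sum() and its best id by min() with key (-view, id).
import Mathlib
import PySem

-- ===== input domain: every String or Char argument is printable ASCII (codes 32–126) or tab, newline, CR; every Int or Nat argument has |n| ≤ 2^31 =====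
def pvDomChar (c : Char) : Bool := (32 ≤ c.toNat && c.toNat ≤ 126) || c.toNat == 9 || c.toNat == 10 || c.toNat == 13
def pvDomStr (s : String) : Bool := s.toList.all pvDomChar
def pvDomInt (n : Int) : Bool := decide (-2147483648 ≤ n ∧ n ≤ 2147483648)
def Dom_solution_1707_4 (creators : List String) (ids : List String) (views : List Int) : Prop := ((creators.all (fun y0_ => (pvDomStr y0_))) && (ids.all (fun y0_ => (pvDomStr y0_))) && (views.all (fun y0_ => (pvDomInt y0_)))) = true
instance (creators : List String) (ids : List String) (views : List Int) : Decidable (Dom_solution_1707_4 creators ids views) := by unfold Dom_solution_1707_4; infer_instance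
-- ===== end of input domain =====

-- B groups records per creator first and derives total/best-id by sum and min-with-key,
-- instead of A's incremental triple maintenance; objective: simpler/alternative decomposition.

-- ===== PORT A =====
-- one loop iteration of A's dict of [sum, bestId, maxView] triples
def pvStepA (d : PySem.Dict String (Int × String × Int)) (t : String × String × Int) :
    PySem.Dict String (Int × String × Int) :=
  match d.get? t.1 with
  | some v =>
    let s := v.1 + t.2.2
    if t.2.2 > v.2.2 then d.insert t.1 (s, t.2.1, t.2.2)
    else if t.2.2 == v.2.2 && t.2.1 < v.2.1 then d.insert t.1 (s, t.2.1, v.2.2)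
    else d.insert t.1 (s, v.2.1, v.2.2)
  | none => d.insert t.1 (t.2.2, t.2.1, t.2.2)

-- one iteration of A's final loop, state = (maxView, ans)
def pvCollectA (st : Int × List (List String)) (kv : String × Int × String × Int) :
    Int × List (List String) :=
  let st1 := if kv.2.1 > st.1 then (kv.2.1, ([] : List (List String))) else st
  if kv.2.1 == st1.1 then (st1.1, st1.2 ++ [[kv.1, kv.2.2.1]]) else st1

def solution_1707_4 (creators : List String) (ids : List String) (views : List Int) :
    List (List String) :=
  let data := (creators.zip (ids.zip views)).foldl pvStepA PySem.Dict.empty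
  (data.items.foldl pvCollectA (0, [])).2

-- ===== PORT B =====
-- B's grouping pass: groups.setdefault(creator, []).append((view, id))
def pvStepB (d : PySem.Dict String (List (Int × String))) (t : String × String × Int) :
    PySem.Dict String (List (Int × String)) :=
  d.modify t.1 [] (fun l => l ++ [(t.2.2, t.2.1)])

-- Python tuple comparison (-r[0], r[1]) < (-c[0], c[1])
def pvKeyLt (r c : Int × String) : Bool := (-r.1 < -c.1) || (-r.1 == -c.1 && r.2 < c.2)

-- min(recs, key=lambda r: (-r[0], r[1])) : first minimal element
def pvMinBy (x : Int × String) (xs : List (Int × String)) : Int × String :=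
  xs.foldl (fun best r => if pvKeyLt r best then r else best) x

-- one iteration of B's final loop, state = (maxView, ans)
def pvCollectB (st : Int × List (List String)) (kv : String × List (Int × String)) :
    Int × List (List String) :=
  let total := (kv.2.map (·.1)).sum
  let best := match kv.2 with
    | [] => ((0 : Int), "")  -- unreachable totality guard: every group is non-empty (Python's min would raise)
    | x :: xs => pvMinBy x xs
  let st1 := if total > st.1 then (total, ([] : List (List String))) else st
  if total == st1.1 then (st1.1, st1.2 ++ [[kv.1, best.2]]) else st1

def solution_1707_4_alt (creators : List String) (ids : List String) (views : List Int) :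
    List (List String) :=
  let groups := (creators.zip (ids.zip views)).foldl pvStepB PySem.Dict.empty
  (groups.items.foldl pvCollectB (0, [])).2

-- ===== PRECONDITION & SPEC =====
def Spec_solution_1707_4 (creators : List String) (ids : List String) (views : List Int) (out : List (List String)) : Prop := out = solution_1707_4_alt creators ids views
instance (creators : List String) (ids : List String) (views : List Int) (out : List (List String)) : Decidable (Spec_solution_1707_4 creators ids views out) := by unfold Spec_solution_1707_4; infer_instance

-- ===== CLAIM (what is proved, stated in full; the proofs are below) =====
def Claim_equal_solution_1707_4 : Prop := ∀ (creators : List String) (ids : List String) (views : List Int), Dom_solution_1707_4 creators ids views → Spec_solution_1707_4 creators ids views (solution_1707_4 creators ids views)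

-- ===== LEMMAS AND PROOFS =====

-- summary of a group: (total views, best id, max single view) — A's triple as a function of B's record list
def pvR (recs : List (Int × String)) : Int × String × Int :=
  let best := match recs with | [] => ((0 : Int), "") | x :: xs => pvMinBy x xs
  ((recs.map (·.1)).sum, best.2, best.1)

-- B's dict with every group summarised: pointwise image of A's dict
def pvMapVal (d : PySem.Dict String (List (Int × String))) :
    PySem.Dict String (Int × String × Int) :=
  PySem.Dict.mk (d.items.map (fun p => (p.1, pvR p.2)))

theorem pvGet?_mapVal (d : PySem.Dict String (List (Int × String))) (k : String) :
    (pvMapVal d).get? k = (d.get? k).map pvR := by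
  obtain ⟨l⟩ := d
  induction l with
  | nil => rfl
  | cons p rest ih =>
    simp only [pvMapVal, List.map_cons] at *
    rw [PySem.Dict.get?_mk_cons, PySem.Dict.get?_mk_cons]
    by_cases h : (p.1 == k) = true
    · simp [h]
    · simp only [h, Bool.false_eq_true, if_false, ih]

theorem pvContains_mapVal (d : PySem.Dict String (List (Int × String))) (k : String) :
    (pvMapVal d).contains k = d.contains k := by
  rw [PySem.Dict.contains_eq_isSome_get?, PySem.Dict.contains_eq_isSome_get?, pvGet?_mapVal]
  cases d.get? k <;> rfl

-- appending one record updates the summary exactly as A's branches do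
theorem pvR_snoc (x : Int × String) (xs : List (Int × String)) (v : Int) (id : String) :
    pvR ((x :: xs) ++ [(v, id)]) =
      (if v > (pvR (x :: xs)).2.2 then ((pvR (x :: xs)).1 + v, id, v)
       else if v == (pvR (x :: xs)).2.2 && id < (pvR (x :: xs)).2.1 then
         ((pvR (x :: xs)).1 + v, id, (pvR (x :: xs)).2.2)
       else ((pvR (x :: xs)).1 + v, (pvR (x :: xs)).2.1, (pvR (x :: xs)).2.2)) := by
  rcases hmb : pvMinBy x xs with ⟨m, bid⟩
  have hR : pvR (x :: xs) = (((x :: xs).map (·.1)).sum, bid, m) := by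
    simp [pvR, hmb]
  have hA : pvR ((x :: xs) ++ [(v, id)]) =
      (((x :: xs).map (·.1)).sum + v,
       (if pvKeyLt (v, id) (m, bid) then (v, id) else (m, bid)).2,
       (if pvKeyLt (v, id) (m, bid) then (v, id) else (m, bid)).1) := by
    simp only [pvR, List.cons_append, pvMinBy, List.foldl_append, List.foldl_cons,
      List.foldl_nil, List.map_append, List.map_cons, List.map_nil, List.sum_append,
      List.sum_cons, List.sum_nil]
    rw [show List.foldl (fun best r => if pvKeyLt r best = true then r else best) x xs
          = pvMinBy x xs from rfl, hmb]
    simp [add_assoc]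
  rw [hA, hR]
  by_cases h1 : m < v
  · have hk : pvKeyLt (v, id) (m, bid) = true := by
      simp only [pvKeyLt, Bool.or_eq_true, decide_eq_true_eq]; left; omega
    simp [hk, h1]
  · by_cases h2 : v = m ∧ id < bid
    · have hk : pvKeyLt (v, id) (m, bid) = true := by
        simp only [pvKeyLt, Bool.or_eq_true, Bool.and_eq_true, decide_eq_true_eq, beq_iff_eq]
        right; exact ⟨by omega, h2.2⟩
      simp only [hk, if_true]
      simp [h2.1, h2.2]
    · have hk : pvKeyLt (v, id) (m, bid) = false := by
        simp only [pvKeyLt, Bool.or_eq_false_iff, Bool.and_eq_false_iff, decide_eq_false_iff_not,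
          beq_eq_false_iff_ne, ne_eq, neg_inj]
        constructor
        · omega
        · by_cases hv : v = m
          · right; intro hlt; exact h2 ⟨hv, hlt⟩
          · left; exact hv
      have hcond : (v == m && decide (id < bid)) = false := by
        by_cases hv : v = m
        · subst hv; simp only [beq_self_eq_true, Bool.true_and, decide_eq_false_iff_not]
          intro hlt; exact h2 ⟨rfl, hlt⟩
        · simp [hv]
      rw [if_neg (show ¬ v > m from h1)]
      simp only [hk, hcond, Bool.false_eq_true, if_false]

-- inserting a group commutes with the summary map
theorem pvMapVal_insert (d : PySem.Dict String (List (Int × String))) (k : String)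
    (L : List (Int × String)) :
    pvMapVal (d.insert k L) = (pvMapVal d).insert k (pvR L) := by
  apply PySem.Dict.ext
  by_cases hc : d.contains k = true
  · have hcA : (pvMapVal d).contains k = true := by rw [pvContains_mapVal]; exact hc
    show (d.insert k L).items.map _ = _
    rw [PySem.Dict.items_insert_of_contains _ _ hc,
      PySem.Dict.items_insert_of_contains _ _ hcA]
    show _ = ((d.items.map fun p => (p.1, pvR p.2)).map _)
    rw [List.map_map, List.map_map]
    apply List.map_congr_left
    intro p _
    by_cases hp : (p.1 == k) = true
    · simp [Function.comp, hp]
    · simp [Function.comp, hp]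
  · have hc' : d.contains k = false := by revert hc; cases d.contains k <;> simp
    have hcA : (pvMapVal d).contains k = false := by rw [pvContains_mapVal]; exact hc'
    show (d.insert k L).items.map _ = _
    rw [PySem.Dict.items_insert_of_not_contains _ _ hc',
      PySem.Dict.items_insert_of_not_contains _ _ hcA]
    simp [pvMapVal]

-- one step of the two loops commutes with the summary map
theorem pvStep_comm (d : PySem.Dict String (List (Int × String))) (t : String × String × Int)
    (hne : ∀ w ∈ d.values, w ≠ []) :
    pvStepA (pvMapVal d) t = pvMapVal (pvStepB d t) := by
  have hmod : pvStepB d t = d.insert t.1 ((d.getD t.1 []) ++ [(t.2.2, t.2.1)]) := rfl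
  cases hg : d.get? t.1 with
  | none =>
    have hgA : (pvMapVal d).get? t.1 = none := by rw [pvGet?_mapVal, hg]; rfl
    have hgd : d.getD t.1 [] = [] := PySem.Dict.getD_of_get?_eq_none d [] hg
    rw [hmod, hgd, pvMapVal_insert]
    simp only [pvStepA, hgA, List.nil_append]
    simp [pvR, pvMinBy]
  | some recs =>
    obtain ⟨y, ys, rfl⟩ : ∃ y ys, recs = y :: ys := by
      have hmem : recs ∈ d.values := by
        have := PySem.Dict.mem_items_of_get?_eq_some d hg
        simp only [PySem.Dict.values]
        exact List.mem_map.mpr ⟨_, this, rfl⟩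
      cases recs with
      | nil => exact absurd rfl (hne _ hmem)
      | cons y ys => exact ⟨y, ys, rfl⟩
    have hgA : (pvMapVal d).get? t.1 = some (pvR (y :: ys)) := by
      rw [pvGet?_mapVal, hg]; rfl
    have hgd : d.getD t.1 [] = y :: ys := PySem.Dict.getD_of_get?_eq_some d [] hg
    rw [hmod, hgd, pvMapVal_insert, pvR_snoc]
    simp only [pvStepA, hgA]
    split_ifs <;> rfl

-- no group built by B's pass is empty
theorem pvValues_nonempty (l : List (String × String × Int))
    (d : PySem.Dict String (List (Int × String))) (h : ∀ w ∈ d.values, w ≠ []) :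
    ∀ w ∈ (l.foldl pvStepB d).values, w ≠ [] := by
  induction l generalizing d with
  | nil => exact h
  | cons t l ih =>
    refine ih _ (fun w hw => ?_)
    have hmod : pvStepB d t = d.insert t.1 ((d.getD t.1 []) ++ [(t.2.2, t.2.1)]) := rfl
    rw [hmod] at hw
    rcases PySem.Dict.mem_values_insert _ _ _ _ hw with h1 | h1
    · subst h1; simp
    · exact h w h1

-- the whole first loop commutes with the summary map
theorem pvFold_comm (l : List (String × String × Int))
    (d : PySem.Dict String (List (Int × String))) (h : ∀ w ∈ d.values, w ≠ []) :
    l.foldl pvStepA (pvMapVal d) = pvMapVal (l.foldl pvStepB d) := by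
  induction l generalizing d with
  | nil => rfl
  | cons t l ih =>
    rw [List.foldl_cons, List.foldl_cons, pvStep_comm d t h]
    refine ih _ (fun w hw => ?_)
    have hmod : pvStepB d t = d.insert t.1 ((d.getD t.1 []) ++ [(t.2.2, t.2.1)]) := rfl
    rw [hmod] at hw
    rcases PySem.Dict.mem_values_insert _ _ _ _ hw with h1 | h1
    · subst h1; simp
    · exact h w h1

-- ===== VERDICT (by name: the statement is the Claim_ definition above) =====
theorem solution_1707_4_spec : Claim_equal_solution_1707_4 := by
  intro creators ids views _
  unfold Spec_solution_1707_4 solution_1707_4 solution_1707_4_alt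
  dsimp only
  set l := creators.zip (ids.zip views) with hl
  have hE : (PySem.Dict.empty : PySem.Dict String (Int × String × Int)) =
      pvMapVal PySem.Dict.empty := rfl
  have hEmp : ∀ w ∈ (PySem.Dict.empty : PySem.Dict String (List (Int × String))).values,
      w ≠ [] := by intro w hw; simp [PySem.Dict.values, PySem.Dict.empty] at hw
  rw [hE, pvFold_comm l _ hEmp]
  set g := l.foldl pvStepB PySem.Dict.empty with hg
  have hitems : (pvMapVal g).items = g.items.map (fun p => (p.1, pvR p.2)) := rfl
  rw [hitems, List.foldl_map]
  have hvals := pvValues_nonempty l PySem.Dict.empty hEmp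
  rw [← hg] at hvals
  refine congrArg Prod.snd ?_
  apply PySem.List.foldl_congr_mem
  intro acc x hx
  obtain ⟨y, ys, hys⟩ : ∃ y ys, x.2 = y :: ys := by
    have hmem : x.2 ∈ g.values := by
      simp only [PySem.Dict.values]; exact List.mem_map.mpr ⟨_, hx, rfl⟩
    cases hxs : x.2 with
    | nil => exact absurd hxs (by rw [← hxs] at hxs ⊢; exact hvals _ hmem)
    | cons y ys => exact ⟨y, ys, rfl⟩
  simp [pvCollectA, pvCollectB, pvR, hys]
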